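-- pv_equiv track=rewrite | github.com/vlad-bezden/data_structures_and_algorithms | data_structures_and_algorithms/factorial_zeros.py | factorial_zeros
-- ===== SOURCE A (Python) =====
-- from typing import Optional
--
-- def zeros(n: int) -> int:
--     """Calculates number of zeroes in factorial number.
--
--     Factorial has 0 if it's devisable by file.
--     So we need to find number of times number divisible by 5
--     """
--
--     counter = 0
--
--     while n:
--         counter += n // 5
--         n //= 5
--
--     return counter
--
-- def factorial_zeros(num_zeros: int) -> Optional[int]:
--     """
--     Uses binary search to find factorial that has num_zeros of trailing 0s.
--     """
--     left = 0
--     right = 5 * num_zeros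
--
--     while left < right:
--         middle = (left + right) // 2
--         if zeros(middle) < num_zeros:
--             left = middle + 1
--         else:
--             right = middle
--
--     return left if zeros(left) == num_zeros else None
-- ===== SOURCE B (Python) =====
-- from typing import Optional
--
--
-- def zeros(n: int) -> int:
--     """Calculates number of zeroes in factorial number.
--
--     Factorial has 0 if it's devisable by file.
--     So we need to find number of times number divisible by 5
--     """
--
--     counter = 0
--
--     while n:
--         counter += n // 5
--         n //= 5
--
--     return counter
--
--
-- def factorial_zeros(num_zeros: int) -> Optional[int]:
--     """
--     Greedy base-5 construction: builds the largest multiple n of 5 with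
--     zeros(n) < num_zeros by adding descending powers of 5; the answer, if it
--     exists, is then n + 5 (zeros is constant between multiples of 5, so the
--     least candidate is a multiple of 5).
--     """
--     if num_zeros <= 0:
--         return 0 if num_zeros == 0 else None
--     p = 5
--     while zeros(p) < num_zeros:
--         p *= 5
--     n = 0
--     while p >= 5:
--         while zeros(n + p) < num_zeros:
--             n += p
--         p //= 5
--     n += 5
--     return n if zeros(n) == num_zeros else None
-- ===== Notes on version B (the rewrite author's own statement) =====
-- stated objective: alternative
-- what changed: Replaces the binary search over [0, 5*num_zeros] with a greedy base-5 construction: grow p to a sufficient power of 5, then build the largest multiple of 5 whose factorial has fewer than num_zeros trailing zeros by adding descending powers of 5, and return its successor multiple of 5 on exact match.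
import Mathlib
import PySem

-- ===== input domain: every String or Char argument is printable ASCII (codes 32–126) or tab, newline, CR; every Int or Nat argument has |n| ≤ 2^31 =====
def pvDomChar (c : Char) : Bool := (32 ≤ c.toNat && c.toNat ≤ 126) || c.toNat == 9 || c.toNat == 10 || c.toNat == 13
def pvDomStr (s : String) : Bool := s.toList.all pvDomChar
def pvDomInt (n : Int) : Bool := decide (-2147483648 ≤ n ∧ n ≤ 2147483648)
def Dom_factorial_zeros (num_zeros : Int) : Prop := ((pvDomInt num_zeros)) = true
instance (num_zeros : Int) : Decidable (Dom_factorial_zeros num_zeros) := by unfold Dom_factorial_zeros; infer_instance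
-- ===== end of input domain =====

-- B replaces A's binary search with a greedy base-5 construction (descending powers
-- of 5), an alternative algorithm of similar cost; same zeros helper.

-- ===== PORT A =====
-- helper 'zeros' (identical source in A and B): exact for n ≥ 0; for n < 0 the Python
-- loop 'while n:' never terminates, and neither entry point ever calls zeros on n < 0,
-- so the 'if 0 < n' guard only makes the Lean function total.
def pyZeros (n : Int) : Int :=
  if _h : 0 < n then
    PySem.Int.floordiv n 5 + pyZeros (PySem.Int.floordiv n 5)
  else 0
termination_by n.toNat
decreasing_by
  rw [PySem.Int.floordiv_eq_ediv_of_pos (by omega : (0:Int) < 5)]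
  omega

def bsearchA (k left right : Int) : Int :=
  if h : left < right then
    let middle := PySem.Int.floordiv (left + right) 2
    if pyZeros middle < k then bsearchA k (middle + 1) right
    else bsearchA k left middle
  else left
termination_by (right - left).toNat
decreasing_by
  · have := PySem.Int.floordiv_eq_ediv_of_pos (a := left + right) (by omega : (0:Int) < 2)
    simp only [this]; omega
  · have := PySem.Int.floordiv_eq_ediv_of_pos (a := left + right) (by omega : (0:Int) < 2)
    simp only [this]; omega

def factorial_zeros (num_zeros : Int) : Option Int :=
  let left := bsearchA num_zeros 0 (5 * num_zeros)
  if pyZeros left = num_zeros then some left else none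

-- ===== PORT B =====
-- lemmas cited by scanB's termination proof (about the shared helper only)
theorem pyZeros_eq (n : Int) :
    pyZeros n = if 0 < n then PySem.Int.floordiv n 5 + pyZeros (PySem.Int.floordiv n 5) else 0 := by
  rw [pyZeros]; split <;> rfl

theorem pyZeros_nonneg (n : Int) : 0 ≤ pyZeros n := by
  induction n using pyZeros.induct with
  | case1 n h ih =>
    rw [pyZeros_eq]; simp only [h, if_true]
    have : 0 ≤ PySem.Int.floordiv n 5 := by
      rw [PySem.Int.floordiv_eq_ediv_of_pos (by omega : (0:Int) < 5)]; omega
    omega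
  | case2 n h => rw [pyZeros_eq]; simp [h]

theorem pyZeros_mono {a b : Int} (hab : a ≤ b) : pyZeros a ≤ pyZeros b := by
  induction b using pyZeros.induct generalizing a with
  | case1 b hb ih =>
    by_cases ha : 0 < a
    · rw [pyZeros_eq a, pyZeros_eq b]; simp only [ha, hb, if_true]
      have h5a := PySem.Int.floordiv_eq_ediv_of_pos (a := a) (by omega : (0:Int) < 5)
      have h5b := PySem.Int.floordiv_eq_ediv_of_pos (a := b) (by omega : (0:Int) < 5)
      have hle : PySem.Int.floordiv a 5 ≤ PySem.Int.floordiv b 5 := by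
        rw [h5a, h5b]; omega
      have := ih hle
      omega
    · rw [pyZeros_eq a]; simp only [ha, if_false]
      exact pyZeros_nonneg b
  | case2 b hb =>
    have ha : ¬ 0 < a := by omega
    rw [pyZeros_eq a, pyZeros_eq b]; simp [ha, hb]

theorem pyZeros_five_mul_ge (k : Int) (hk : 0 ≤ k) : k ≤ pyZeros (5 * k) := by
  rcases lt_or_eq_of_le hk with hk' | hk'
  · rw [pyZeros_eq]
    have h5 : (0:Int) < 5 * k := by omega
    simp only [h5, if_true]
    have : PySem.Int.floordiv (5 * k) 5 = k := by
      rw [PySem.Int.floordiv_eq_ediv_of_pos (by omega : (0:Int) < 5)]; omega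
    rw [this]
    have := pyZeros_nonneg k
    omega
  · rw [← hk']; simp [pyZeros]

theorem scan_lt_bound {k n : Int} (h : pyZeros n < k) : n < 5 * k := by
  have h0 := pyZeros_nonneg n
  have hk : 0 < k := by omega
  by_contra hn
  have : pyZeros (5 * k) ≤ pyZeros n := pyZeros_mono (by omega)
  have := pyZeros_five_mul_ge k (by omega)
  omega

-- inner loop 'while zeros(n + p) < num_zeros: n += p' (the '0 < p' guard only makes
-- the Lean function total; Python diverges for p ≤ 0 and never reaches it)
def stepB (k n p : Int) : Int :=
  if h : 0 < p ∧ pyZeros (n + p) < k then stepB k (n + p) p else n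
termination_by (5 * k - n).toNat
decreasing_by
  have := scan_lt_bound h.2
  omega

-- outer loop 'while p >= 5: …; p //= 5'
def outerB (k n p : Int) : Int :=
  if h : 5 ≤ p then outerB k (stepB k n p) (PySem.Int.floordiv p 5) else n
termination_by p.toNat
decreasing_by
  rw [PySem.Int.floordiv_eq_ediv_of_pos (by omega : (0:Int) < 5)]
  omega

-- 'p = 5; while zeros(p) < num_zeros: p *= 5' (again '0 < p' only for totality)
def growP (k p : Int) : Int :=
  if h : 0 < p ∧ pyZeros p < k then growP k (5 * p) else p
termination_by (5 * k - p).toNat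
decreasing_by
  have := scan_lt_bound h.2
  omega

def factorial_zeros_alt (num_zeros : Int) : Option Int :=
  if num_zeros ≤ 0 then (if num_zeros = 0 then some 0 else none)
  else
    let p := growP num_zeros 5
    let n := outerB num_zeros 0 p + 5
    if pyZeros n = num_zeros then some n else none

-- ===== PRECONDITION & SPEC =====
def Spec_factorial_zeros (num_zeros : Int) (out : Option Int) : Prop := out = factorial_zeros_alt num_zeros
instance (num_zeros : Int) (out : Option Int) : Decidable (Spec_factorial_zeros num_zeros out) := by unfold Spec_factorial_zeros; infer_instance

-- ===== CLAIM (what is proved, stated in full; the proofs are below) =====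
def Claim_equal_factorial_zeros : Prop := ∀ (num_zeros : Int), Dom_factorial_zeros num_zeros → Spec_factorial_zeros num_zeros (factorial_zeros num_zeros)

-- ===== LEMMAS AND PROOFS =====

-- zeros is constant on each block [5q, 5q+4]
theorem pyZeros_block {n i : Int} (h5 : (5:Int) ∣ n) (h0 : 0 ≤ n)
    (hlo : n ≤ i) (hhi : i < n + 5) : pyZeros i = pyZeros n := by
  obtain ⟨q, rfl⟩ := h5
  by_cases hi : 0 < i
  · by_cases hn : 0 < 5 * q
    · rw [pyZeros_eq i, pyZeros_eq (5 * q)]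
      simp only [hi, hn, if_true]
      have : PySem.Int.floordiv i 5 = PySem.Int.floordiv (5 * q) 5 := by
        rw [PySem.Int.floordiv_eq_ediv_of_pos (by omega : (0:Int) < 5),
            PySem.Int.floordiv_eq_ediv_of_pos (by omega : (0:Int) < 5)]
        omega
      rw [this]
    · -- n = 0, 0 < i < 5
      have hq : q = 0 := by omega
      subst hq
      rw [pyZeros_eq i]
      simp only [hi, if_true]
      have : PySem.Int.floordiv i 5 = 0 := by
        rw [PySem.Int.floordiv_eq_ediv_of_pos (by omega : (0:Int) < 5)]; omega
      rw [this]
      norm_num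
  · have h1 : i = 0 := by omega
    have h2 : q = 0 := by omega
    rw [h1, h2]; norm_num

-- "r is the least index whose zeros count reaches k"
def IsLeast5 (k r : Int) : Prop :=
  0 ≤ r ∧ (∀ i : Int, 0 ≤ i → i < r → pyZeros i < k) ∧ k ≤ pyZeros r

theorem isLeast5_unique {k r s : Int} (hr : IsLeast5 k r) (hs : IsLeast5 k s) : r = s := by
  obtain ⟨hr0, hrlow, hrhigh⟩ := hr
  obtain ⟨hs0, hslow, hshigh⟩ := hs
  by_contra hne
  rcases lt_or_gt_of_ne hne with h | h
  · have := hslow r hr0 h; omega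
  · have := hrlow s hs0 h; omega

theorem bsearchA_isLeast5 (m : Nat) (k left right : Int)
    (hm : (right - left).toNat = m)
    (h0 : 0 ≤ left) (hlr : left ≤ right)
    (hlow : ∀ i : Int, 0 ≤ i → i < left → pyZeros i < k)
    (hhigh : k ≤ pyZeros right) :
    IsLeast5 k (bsearchA k left right) := by
  induction m using Nat.strong_induction_on generalizing left right with
  | _ m ih =>
    rw [bsearchA]
    by_cases hlt : left < right
    · simp only [hlt, dite_true]
      have hmid : PySem.Int.floordiv (left + right) 2 = (left + right) / 2 :=
        PySem.Int.floordiv_eq_ediv_of_pos (by omega : (0:Int) < 2)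
      rw [hmid]
      set middle := (left + right) / 2 with hmdef
      have hmlo : left ≤ middle := by rw [hmdef]; omega
      have hmhi : middle < right := by rw [hmdef]; omega
      by_cases hz : pyZeros middle < k
      · simp only [hz, if_true]
        refine ih (right - (middle + 1)).toNat (by omega) (middle + 1) right
          rfl (by omega) (by omega) ?_ hhigh
        intro i hi0 hi
        have : pyZeros i ≤ pyZeros middle := pyZeros_mono (by omega)
        omega
      · simp only [hz, if_false]
        exact ih (middle - left).toNat (by omega) left middle rfl h0 hmlo hlow (by omega)
    · simp only [hlt, dite_false]
      have : left = right := by omega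
      exact ⟨h0, hlow, by rw [this]; exact hhigh⟩

theorem pyZeros_zero : pyZeros 0 = 0 := by simp [pyZeros]

theorem stepB_spec (m : Nat) (k n p : Int) (hm : (5 * k - n).toNat = m)
    (hp : 0 < p) (hn : pyZeros n < k) :
    n ≤ stepB k n p ∧ p ∣ (stepB k n p - n) ∧ pyZeros (stepB k n p) < k ∧
      ¬ pyZeros (stepB k n p + p) < k := by
  induction m using Nat.strong_induction_on generalizing n with
  | _ m ih =>
    rw [stepB]
    by_cases hz : pyZeros (n + p) < k
    · have hcond : 0 < p ∧ pyZeros (n + p) < k := ⟨hp, hz⟩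
      rw [dif_pos hcond]
      have hbound := scan_lt_bound hz
      obtain ⟨h1, h2, h3, h4⟩ := ih (5 * k - (n + p)).toNat (by omega) (n + p) rfl hz
      refine ⟨by omega, ?_, h3, h4⟩
      obtain ⟨c, hc⟩ := h2
      exact ⟨c + 1, by linear_combination hc⟩
    · have hcond : ¬ (0 < p ∧ pyZeros (n + p) < k) := by tauto
      rw [dif_neg hcond]
      exact ⟨le_refl n, ⟨0, by omega⟩, hn, hz⟩

theorem outerB_spec (j : Nat) (k n : Int)
    (h0 : 0 ≤ n) (h5 : (5:Int) ∣ n) (hn : pyZeros n < k) :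
    0 ≤ outerB k n (5 ^ (j + 1)) ∧ (5:Int) ∣ outerB k n (5 ^ (j + 1)) ∧
      pyZeros (outerB k n (5 ^ (j + 1))) < k ∧
      k ≤ pyZeros (outerB k n (5 ^ (j + 1)) + 5) := by
  induction j generalizing n with
  | zero =>
    rw [outerB]
    have hge : (5:Int) ≤ 5 ^ (0 + 1) := by norm_num
    rw [dif_pos hge]
    obtain ⟨h1, h2, h3, h4⟩ := stepB_spec (5 * k - n).toNat k n (5 ^ (0 + 1)) rfl (by norm_num) hn
    have hdvd : (5:Int) ∣ stepB k n (5 ^ (0 + 1)) := by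
      obtain ⟨c, hc⟩ := h2
      obtain ⟨d, hd⟩ := h5
      exact ⟨d + c, by linear_combination hc + hd⟩
    have hfd : PySem.Int.floordiv (5 ^ (0 + 1)) 5 = 1 := by
      rw [PySem.Int.floordiv_eq_ediv_of_pos (by omega : (0:Int) < 5)]; norm_num
    rw [hfd, outerB]
    rw [dif_neg (show ¬ (5:Int) ≤ 1 by omega)]
    refine ⟨by omega, hdvd, h3, by simpa using h4⟩
  | succ j ihj =>
    rw [outerB]
    have hp : (0:Int) < 5 ^ (j + 1 + 1) := by positivity
    have hge : (5:Int) ≤ 5 ^ (j + 1 + 1) := by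
      calc (5:Int) = 5 ^ 1 := by norm_num
      _ ≤ 5 ^ (j + 1 + 1) := by
        apply pow_le_pow_right₀ (by norm_num) (by omega)
    rw [dif_pos hge]
    obtain ⟨h1, h2, h3, h4⟩ := stepB_spec (5 * k - n).toNat k n (5 ^ (j + 1 + 1)) rfl hp hn
    have hdvd : (5:Int) ∣ stepB k n (5 ^ (j + 1 + 1)) := by
      obtain ⟨c, hc⟩ := h2
      obtain ⟨d, hd⟩ := h5
      exact ⟨d + 5 ^ (j + 1) * c, by linear_combination hc + hd⟩
    have hfd : PySem.Int.floordiv (5 ^ (j + 1 + 1)) 5 = 5 ^ (j + 1) := by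
      rw [PySem.Int.floordiv_eq_ediv_of_pos (by omega : (0:Int) < 5)]
      have : (5:Int) ^ (j + 1 + 1) = 5 ^ (j + 1) * 5 := by ring
      rw [this, Int.mul_ediv_cancel _ (by omega)]
    rw [hfd]
    exact ihj (stepB k n (5 ^ (j + 1 + 1))) (by omega) hdvd h3

theorem growP_pow5 (m : Nat) (k p : Int) (hm : (5 * k - p).toNat = m)
    (hp : ∃ j : Nat, p = 5 ^ (j + 1)) : ∃ j : Nat, growP k p = 5 ^ (j + 1) := by
  induction m using Nat.strong_induction_on generalizing p with
  | _ m ih =>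
    obtain ⟨j, rfl⟩ := hp
    rw [growP]
    by_cases hz : pyZeros (5 ^ (j + 1)) < k
    · have hpos : (0:Int) < 5 ^ (j + 1) := by positivity
      have hcond : (0:Int) < 5 ^ (j + 1) ∧ pyZeros (5 ^ (j + 1)) < k := ⟨hpos, hz⟩
      rw [dif_pos hcond]
      have hbound := scan_lt_bound hz
      have h5p : (5:Int) * 5 ^ (j + 1) = 5 ^ (j + 1 + 1) := by ring
      rw [h5p]
      exact ih (5 * k - 5 ^ (j + 1 + 1)).toNat (by rw [← h5p]; omega) (5 ^ (j + 1 + 1)) rfl ⟨j + 1, rfl⟩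
    · have hcond : ¬ ((0:Int) < 5 ^ (j + 1) ∧ pyZeros (5 ^ (j + 1)) < k) := by tauto
      rw [dif_neg hcond]
      exact ⟨j, rfl⟩

theorem altB_isLeast5 (k : Int) (hk : 0 < k) :
    IsLeast5 k (outerB k 0 (growP k 5) + 5) := by
  obtain ⟨j, hj⟩ := growP_pow5 (5 * k - 5).toNat k 5 rfl ⟨0, by norm_num⟩
  rw [hj]
  obtain ⟨h1, h2, h3, h4⟩ := outerB_spec j k 0 (le_refl 0) ⟨0, by ring⟩
    (by rw [pyZeros_zero]; omega)
  set r := outerB k 0 (5 ^ (j + 1)) with hr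
  refine ⟨by omega, ?_, h4⟩
  intro i hi0 hi
  by_cases hcase : i ≤ r
  · have := pyZeros_mono hcase; omega
  · have : pyZeros i = pyZeros r := pyZeros_block h2 h1 (by omega) (by omega)
    omega

-- ===== VERDICT (by name: the statement is the Claim_ definition above) =====
theorem factorial_zeros_spec : Claim_equal_factorial_zeros := by
  intro k _dom
  unfold Spec_factorial_zeros factorial_zeros factorial_zeros_alt
  by_cases hk : 0 < k
  · have hA : IsLeast5 k (bsearchA k 0 (5 * k)) :=
      bsearchA_isLeast5 (5 * k - 0).toNat k 0 (5 * k) rfl (by omega) (by omega)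
        (by intro i hi0 hi; omega) (pyZeros_five_mul_ge k (by omega))
    have hB : IsLeast5 k (outerB k 0 (growP k 5) + 5) := altB_isLeast5 k hk
    have hk' : ¬ k ≤ 0 := by omega
    simp only [hk', if_false]
    rw [isLeast5_unique hA hB]
  · -- k ≤ 0: A's loop exits immediately with 0; B takes its num_zeros ≤ 0 branch
    have hA : bsearchA k 0 (5 * k) = 0 := by
      rw [bsearchA]
      have : ¬ ((0:Int) < 5 * k) := by omega
      simp [this]
    have hk' : k ≤ 0 := by omega
    rw [hA]
    simp only [hk', if_true, pyZeros_zero]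
    by_cases h0 : k = 0
    · simp [h0]
    · have : ¬ ((0:Int) = k) := by omega
      simp [this, h0]
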